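-- pv_equiv track=rewrite | github.com/chedlund110/cms_rate_transparency_grouped_keys | rate_storage.py | build_rate_cache_index
-- ===== SOURCE A (Python) =====
-- def build_rate_cache_index(rate_cache: dict) -> dict:
--     """
--     Builds multiple indexes from rate_cache:
--     - by_proc: rate_sheet_code -> proc_code -> list of full keys
--     - by_modifier: rate_sheet_code -> modifier -> list of full keys
--     - by_pos: rate_sheet_code -> pos -> list of full keys
--
--     These indexes support fast lookups when filtering by different dimensions.
--     """
--     by_proc = {}
--     by_modifier = {}
--     by_pos = {}
--
--     for full_key in rate_cache:
--         if len(full_key) == 5: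
--             rate_sheet_code, proc_code, modifier, pos, _ = full_key
--         else:
--             rate_sheet_code, proc_code, modifier, pos, _, _ = full_key
--
--         # Index by proc
--         if rate_sheet_code not in by_proc:
--             by_proc[rate_sheet_code] = {}
--         if proc_code not in by_proc[rate_sheet_code]:
--             by_proc[rate_sheet_code][proc_code] = []
--         by_proc[rate_sheet_code][proc_code].append(full_key)
--
--         # Index by modifier
--         if rate_sheet_code not in by_modifier:
--             by_modifier[rate_sheet_code] = {}
--         if modifier not in by_modifier[rate_sheet_code]:
--             by_modifier[rate_sheet_code][modifier] = []
--         by_modifier[rate_sheet_code][modifier].append(full_key)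
--
--         # Index by POS
--         if rate_sheet_code not in by_pos:
--             by_pos[rate_sheet_code] = {}
--         if pos not in by_pos[rate_sheet_code]:
--             by_pos[rate_sheet_code][pos] = []
--         by_pos[rate_sheet_code][pos].append(full_key)
--
--     return {
--         "by_proc": by_proc,
--         "by_modifier": by_modifier,
--         "by_pos": by_pos
--     }
-- ===== SOURCE B (Python) =====
-- def build_rate_cache_index(rate_cache: dict) -> dict:
--     """
--     Builds the three indexes (by_proc / by_modifier / by_pos) with one generic
--     helper that makes a single-dimension index in its own pass over rate_cache.
--     """
--     def index_by(pos: int) -> dict: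
--         idx = {}
--         for full_key in rate_cache:
--             idx.setdefault(full_key[0], {}).setdefault(full_key[pos], []).append(full_key)
--         return idx
--
--     return {
--         "by_proc": index_by(1),
--         "by_modifier": index_by(2),
--         "by_pos": index_by(3),
--     }
-- ===== Notes on version B (the rewrite author's own statement) =====
-- stated objective: simpler
-- what changed: One generic helper (value position + setdefault chains) builds each nested index in its own pass over rate_cache, replacing the single combined loop with three copies of the unpack/contains/insert logic.
import Mathlib
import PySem

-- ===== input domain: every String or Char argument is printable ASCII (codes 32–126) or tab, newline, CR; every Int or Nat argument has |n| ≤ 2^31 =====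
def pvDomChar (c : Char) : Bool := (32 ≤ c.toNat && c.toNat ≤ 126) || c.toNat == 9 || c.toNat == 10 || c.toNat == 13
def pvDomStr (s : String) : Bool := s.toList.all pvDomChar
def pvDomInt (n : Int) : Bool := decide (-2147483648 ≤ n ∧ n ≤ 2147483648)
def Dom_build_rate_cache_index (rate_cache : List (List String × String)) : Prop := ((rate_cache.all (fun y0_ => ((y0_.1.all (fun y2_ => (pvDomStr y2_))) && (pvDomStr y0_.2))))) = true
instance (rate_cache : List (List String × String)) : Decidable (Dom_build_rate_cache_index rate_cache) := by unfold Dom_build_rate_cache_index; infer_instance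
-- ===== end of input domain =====

-- B builds each of the three nested indexes with one generic helper (value position +
-- setdefault chains) in its own pass, instead of A's single loop with three copies of the
-- unpack/contains/insert logic. Equivalence of the RETURN value on all inputs A accepts.

-- the nested-index type: rate_sheet_code -> dimension value -> list of full keys
def pvIdx : Type := PySem.Dict String (PySem.Dict String (List (List String)))

-- dict-of-dicts -> the association-list output type
def pvDictOut (d : pvIdx) : List (String × List (String × List (List String))) :=
  d.items.map (fun p => (p.1, p.2.items))

-- ===== PORT A =====
-- one indexing block of A's loop body: the two 'not in'/initialise steps, then the append
def pvStepA (d : pvIdx) (rsc v : String) (fk : List String) : pvIdx :=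
  let d := if d.contains rsc then d else d.insert rsc PySem.Dict.empty
  let inner := d.getD rsc PySem.Dict.empty
  let inner := if inner.contains v then inner else inner.insert v []
  d.insert rsc (inner.insert v (inner.getD v [] ++ [fk]))

-- A's loop body: unpack (len 5 or 6; any other length raises ValueError, excluded by Pre_),
-- then update the three indexes
def pvLoopA (st : pvIdx × pvIdx × pvIdx) (kv : List String × String) : pvIdx × pvIdx × pvIdx :=
  match kv.1 with
  | [rsc, proc, m, pos, _] =>
      (pvStepA st.1 rsc proc kv.1, pvStepA st.2.1 rsc m kv.1, pvStepA st.2.2 rsc pos kv.1)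
  | [rsc, proc, m, pos, _, _] =>
      (pvStepA st.1 rsc proc kv.1, pvStepA st.2.1 rsc m kv.1, pvStepA st.2.2 rsc pos kv.1)
  | _ => st

def build_rate_cache_index (rate_cache : List (List String × String)) : List (String × List (String × List (String × List (List String)))) :=
  let st := rate_cache.foldl pvLoopA (PySem.Dict.empty, PySem.Dict.empty, PySem.Dict.empty)
  [("by_proc", pvDictOut st.1), ("by_modifier", pvDictOut st.2.1), ("by_pos", pvDictOut st.2.2)]

-- ===== PORT B =====
-- B's setdefault(...,{}).setdefault(...,[]).append(fk) chain = modify at full_key[0], then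
-- at full_key[pos] (Dict.modify is exactly d[k] = f(d.get(k, dflt))); full_key[i] is pyGetD
-- with default "" (Python raises IndexError only outside Pre_)
def pvStepB (pos : Int) (idx : pvIdx) (kv : List String × String) : pvIdx :=
  idx.modify (PySem.List.pyGetD kv.1 0 "") PySem.Dict.empty
    (fun inner => inner.modify (PySem.List.pyGetD kv.1 pos "") [] (· ++ [kv.1]))

def pvIndexBy (rate_cache : List (List String × String)) (pos : Int) : pvIdx :=
  rate_cache.foldl (pvStepB pos) PySem.Dict.empty

def build_rate_cache_index_alt (rate_cache : List (List String × String)) : List (String × List (String × List (String × List (List String)))) :=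
  [("by_proc", pvDictOut (pvIndexBy rate_cache 1)),
   ("by_modifier", pvDictOut (pvIndexBy rate_cache 2)),
   ("by_pos", pvDictOut (pvIndexBy rate_cache 3))]

-- ===== PRECONDITION & SPEC =====
-- Pre_ excludes exactly the inputs on which A raises: a key whose length is neither 5 nor 6
-- makes A's tuple unpacking raise ValueError.
def Pre_build_rate_cache_index (rate_cache : List (List String × String)) : Prop :=
  ∀ kv ∈ rate_cache, kv.1.length = 5 ∨ kv.1.length = 6
instance (rate_cache : List (List String × String)) : Decidable (Pre_build_rate_cache_index rate_cache) := by unfold Pre_build_rate_cache_index; infer_instance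

def pvWitness_build_rate_cache_index : (List (List String × String)) :=
  [(["r", "p", "m", "s", "x"], "v"), (["r", "q", "m", "t", "x", "y"], "w")]

def Spec_build_rate_cache_index (rate_cache : List (List String × String)) (out : List (String × List (String × List (String × List (List String))))) : Prop := out = build_rate_cache_index_alt rate_cache
instance (rate_cache : List (List String × String)) (out : List (String × List (String × List (String × List (List String))))) : Decidable (Spec_build_rate_cache_index rate_cache out) := by
  unfold Spec_build_rate_cache_index
  letI h1 : DecidableEq (String × List (String × List (List String))) := inferInstance
  letI h2 : DecidableEq (String × List (String × List (String × List (List String)))) := inferInstance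
  infer_instance

-- ===== CLAIM (what is proved, stated in full; the proofs are below) =====
def Claim_equal_build_rate_cache_index : Prop := ∀ (rate_cache : List (List String × String)), Dom_build_rate_cache_index rate_cache → Pre_build_rate_cache_index rate_cache → Spec_build_rate_cache_index rate_cache (build_rate_cache_index rate_cache)

-- ===== LEMMAS AND PROOFS =====

-- A's contains/insert/append block is B's nested modify
lemma pvStepA_eq_modify (d : pvIdx) (rsc v : String) (fk : List String) :
    pvStepA d rsc v fk
      = d.modify rsc PySem.Dict.empty (fun inner => inner.modify v [] (· ++ [fk])) := by
  show pvStepA d rsc v fk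
      = d.insert rsc ((d.getD rsc PySem.Dict.empty).insert v
          ((d.getD rsc PySem.Dict.empty).getD v [] ++ [fk]))
  cases hr : d.contains rsc with
  | false =>
    have hd : d.getD rsc PySem.Dict.empty = PySem.Dict.empty :=
      PySem.Dict.getD_of_not_contains _ _ hr
    simp [pvStepA, hr, hd, PySem.Dict.getD_insert_self, PySem.Dict.insert_insert_self,
      PySem.Dict.contains_empty, PySem.Dict.getD_empty]
  | true =>
    cases hv : (d.getD rsc PySem.Dict.empty).contains v with
    | false =>
      have h2 : (d.getD rsc PySem.Dict.empty).getD v [] = [] :=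
        PySem.Dict.getD_of_not_contains _ _ hv
      simp [pvStepA, hr, hv, h2, PySem.Dict.getD_insert_self, PySem.Dict.insert_insert_self]
    | true => simp [pvStepA, hr, hv]

-- the combined pass splits into the three independent passes
lemma pvFold_split (l : List (List String × String))
    (h : ∀ kv ∈ l, kv.1.length = 5 ∨ kv.1.length = 6) (d1 d2 d3 : pvIdx) :
    l.foldl pvLoopA (d1, d2, d3)
      = (l.foldl (pvStepB 1) d1, l.foldl (pvStepB 2) d2, l.foldl (pvStepB 3) d3) := by
  induction l generalizing d1 d2 d3 with
  | nil => rfl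
  | cons kv t ih =>
    have hk := h kv (List.mem_cons_self)
    have hstep : pvLoopA (d1, d2, d3) kv = (pvStepB 1 d1 kv, pvStepB 2 d2 kv, pvStepB 3 d3 kv) := by
      obtain ⟨k, v⟩ := kv
      rcases k with _ | ⟨a, _ | ⟨b, _ | ⟨c, _ | ⟨e, _ | ⟨f, _ | ⟨g, _ | ⟨i, t'⟩⟩⟩⟩⟩⟩⟩ <;>
        simp_all [pvLoopA, pvStepB, pvStepA_eq_modify,
          PySem.List.pyGetD, PySem.List.pyGet?, PySem.List.pyIdx?]
    rw [List.foldl_cons, List.foldl_cons, List.foldl_cons, List.foldl_cons, hstep]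
    exact ih (fun kv hkv => h kv (List.mem_cons_of_mem _ hkv)) _ _ _

-- ===== VERDICT (by name: the statement is the Claim_ definition above) =====
theorem build_rate_cache_index_spec : Claim_equal_build_rate_cache_index := by
  intro rc _ hpre
  show build_rate_cache_index rc = build_rate_cache_index_alt rc
  unfold build_rate_cache_index build_rate_cache_index_alt pvIndexBy
  rw [pvFold_split rc hpre]
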